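-- pv_equiv track=rewrite | github.com/Zhangtaining/cell_research | analysis/cell_type_distribution_change.py | get_homogenity_in_each_group
-- ===== SOURCE A (Python) =====
-- def get_homogenity_in_each_group(move):
--     group_id = -1
--     b_count = 0
--     s_count = 0
--     res = []
--     for [g_id, c_type] in move:
--         if g_id != group_id:
--             if group_id != -1:
--                 res.append(abs(b_count - s_count))
--             group_id = g_id
--             b_count = 0
--             s_count = 0
--         if c_type == 1:
--             b_count+=1
--         if c_type == 0:
--             s_count += 1
--     res.append(abs(b_count - s_count))
--     return res
-- ===== SOURCE B (Python) =====
-- def get_homogenity_in_each_group(move):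
--     # Split move into runs of consecutive rows with equal group id, then
--     # map each run to |#(c_type==1) - #(c_type==0)|.
--     runs = []
--     rest = move
--     while rest:
--         g = rest[0][0]
--         i = 1
--         while i < len(rest) and rest[i][0] == g:
--             i += 1
--         runs.append(rest[:i])
--         rest = rest[i:]
--     res = [abs(sum(1 for r in run if r[1] == 1) - sum(1 for r in run if r[1] == 0))
--            for run in runs]
--     return res or [0]
-- ===== Notes on version B (the rewrite author's own statement) =====
-- stated objective: alternative
-- what changed: B first splits move into maximal runs of consecutive equal group ids and then maps each run to |count(type 1) - count(type 0)|, instead of A's single pass with a group_id=-1 sentinel and reset/append bookkeeping.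
-- intended difference: On inputs containing a row with group id -1 that is followed later by a row with a different group id, A's sentinel (group_id initialised to -1) collides with the real id and A silently drops that -1 group's |buy-sell| value, returning a shorter list; B returns the value for every consecutive group, which is the intended per-group result. — e.g. on get_homogenity_in_each_group([[-1, 1], [2, 0]]): A returns [1], B returns [1, 1]
import Mathlib
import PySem

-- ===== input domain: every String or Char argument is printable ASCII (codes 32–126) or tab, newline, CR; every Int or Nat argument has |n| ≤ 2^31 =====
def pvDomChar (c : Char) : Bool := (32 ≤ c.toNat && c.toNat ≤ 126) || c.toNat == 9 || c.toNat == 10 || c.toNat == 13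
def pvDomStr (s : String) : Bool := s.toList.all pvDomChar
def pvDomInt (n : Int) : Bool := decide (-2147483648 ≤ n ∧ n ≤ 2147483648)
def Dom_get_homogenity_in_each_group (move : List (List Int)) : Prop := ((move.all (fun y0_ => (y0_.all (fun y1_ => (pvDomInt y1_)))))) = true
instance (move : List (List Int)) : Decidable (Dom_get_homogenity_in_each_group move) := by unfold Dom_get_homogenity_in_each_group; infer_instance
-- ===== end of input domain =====

-- B splits move into maximal runs of equal consecutive group ids and maps each run to
-- |#(c_type=1) - #(c_type=0)|, replacing A's single-pass sentinel/reset bookkeeping (objective: alternative).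

-- ===== PORT A =====
-- the for-loop of A as structural recursion over the same state (group_id, b_count, s_count, res);
-- the trailing append is the [] case
def loopA : Int → Int → Int → List Int → List (List Int) → List Int
  | _, b, s, res, [] => res ++ [|b - s|]
  | gid, b, s, res, row :: rest =>
    let g := row.getD 0 0      -- unpacking [g_id, c_type]; rows have length 2 inside Pre_
    let c := row.getD 1 0
    if g ≠ gid then
      loopA g (if c = 1 then (0:Int) + 1 else 0) (if c = 0 then (0:Int) + 1 else 0)
        (if gid ≠ -1 then res ++ [|b - s|] else res) rest
    else
      loopA gid (if c = 1 then b + 1 else b) (if c = 0 then s + 1 else s) res rest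

def get_homogenity_in_each_group (move : List (List Int)) : List Int :=
  loopA (-1) 0 0 [] move

-- ===== PORT B =====
-- the outer while of Source B: peel one maximal run (inner while = takeWhile/dropWhile) per step
def runsB (move : List (List Int)) : List (List (List Int)) :=
  match move with
  | [] => []
  | row :: rest =>
    (row :: rest.takeWhile (fun r => r.getD 0 0 == row.getD 0 0)) ::
      runsB (rest.dropWhile (fun r => r.getD 0 0 == row.getD 0 0))
termination_by move.length
decreasing_by
  simp only [List.length_cons]
  have := List.length_dropWhile_le (fun r => r.getD 0 0 == row.getD 0 0) rest
  omega

-- abs(sum(1 for r in run if r[1] == 1) - sum(1 for r in run if r[1] == 0))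
def homogRun (run : List (List Int)) : Int :=
  |((run.countP (fun r => r.getD 1 0 == 1) : Int)) - ((run.countP (fun r => r.getD 1 0 == 0) : Int))|

def get_homogenity_in_each_group_alt (move : List (List Int)) : List Int :=
  let res := (runsB move).map homogRun
  if res = [] then [0] else res      -- `return res or [0]`

-- ===== PRECONDITION & SPEC =====
-- Pre_ excludes exactly the inputs on which A raises ValueError: a row that does not unpack as [g_id, c_type]
def Pre_get_homogenity_in_each_group (move : List (List Int)) : Prop :=
  ∀ r ∈ move, r.length = 2
instance (move : List (List Int)) : Decidable (Pre_get_homogenity_in_each_group move) := by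
  unfold Pre_get_homogenity_in_each_group; infer_instance

def pvWitness_get_homogenity_in_each_group : List (List Int) := [[1, 1], [1, 0], [2, 0]]

-- On inputs with a row of group id -1 followed later by a row with a different group id, A's
-- group_id=-1 sentinel collides with the real id and A drops that group's |buy-sell| value
-- (a shorter list); B returns the value for every consecutive group, the intended result.
def D_get_homogenity_in_each_group (move : List (List Int)) : Prop :=
  ∃ i < move.length, ∃ j < move.length, i < j ∧
    (move.getD i []).getD 0 0 = -1 ∧ ¬ (move.getD j []).getD 0 0 = -1
instance (move : List (List Int)) : Decidable (D_get_homogenity_in_each_group move) := by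
  unfold D_get_homogenity_in_each_group; infer_instance

def Spec_get_homogenity_in_each_group (move : List (List Int)) (out : List Int) : Prop :=
  ¬ D_get_homogenity_in_each_group move → out = get_homogenity_in_each_group_alt move
instance (move : List (List Int)) (out : List Int) : Decidable (Spec_get_homogenity_in_each_group move out) := by
  unfold Spec_get_homogenity_in_each_group; infer_instance

def pvDiffWitness_get_homogenity_in_each_group : List (List Int) := [[-1, 1], [2, 0]]
def pvDiffWitnessOut_get_homogenity_in_each_group : (List Int) × (List Int) := ([1], [1, 1])

-- ===== CLAIM (what is proved, stated in full; the proofs are below) =====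
def Claim_unchanged_get_homogenity_in_each_group : Prop := ∀ (move : List (List Int)), Dom_get_homogenity_in_each_group move → Pre_get_homogenity_in_each_group move → Spec_get_homogenity_in_each_group move (get_homogenity_in_each_group move)
def Claim_changed_get_homogenity_in_each_group : Prop := Dom_get_homogenity_in_each_group (pvDiffWitness_get_homogenity_in_each_group) ∧ Pre_get_homogenity_in_each_group (pvDiffWitness_get_homogenity_in_each_group) ∧ D_get_homogenity_in_each_group (pvDiffWitness_get_homogenity_in_each_group) ∧ get_homogenity_in_each_group (pvDiffWitness_get_homogenity_in_each_group) = pvDiffWitnessOut_get_homogenity_in_each_group.1 ∧ get_homogenity_in_each_group_alt (pvDiffWitness_get_homogenity_in_each_group) = pvDiffWitnessOut_get_homogenity_in_each_group.2 ∧ pvDiffWitnessOut_get_homogenity_in_each_group.1 ≠ pvDiffWitnessOut_get_homogenity_in_each_group.2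
def Claim_exact_get_homogenity_in_each_group : Prop := ∀ (move : List (List Int)), Dom_get_homogenity_in_each_group move → Pre_get_homogenity_in_each_group move → D_get_homogenity_in_each_group move → get_homogenity_in_each_group move ≠ get_homogenity_in_each_group_alt move

-- ===== LEMMAS AND PROOFS =====

-- proof-only helper: ndIds ids = true iff no -1 in ids is followed by a different id
def ndIds : List Int → Bool
  | [] => true
  | x :: xs => if x = -1 then xs.all (fun y => y == -1) else ndIds xs

theorem ndIds_false_iff (l : List Int) :
    ndIds l = false ↔ ∃ i < l.length, ∃ j < l.length, i < j ∧ l.getD i 0 = -1 ∧ ¬ l.getD j 0 = -1 := by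
  induction l with
  | nil => simp [ndIds]
  | cons x xs ih =>
    by_cases hx : x = -1
    · rw [show ndIds (x :: xs) = xs.all (fun y => y == -1) from by simp [ndIds, hx]]
      constructor
      · intro h
        rw [List.all_eq_false] at h
        obtain ⟨y, hy, hny⟩ := h
        obtain ⟨j, hj, rfl⟩ := List.mem_iff_getElem.mp hy
        refine ⟨0, by simp, j + 1, by simp [hj], by omega, by simp [hx], ?_⟩
        rw [List.getD_cons_succ, List.getD_eq_getElem _ _ hj]
        simpa using hny
      · rintro ⟨i, hi, j, hj, hij, -, hgj⟩
        rw [List.all_eq_false]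
        have hj' : j - 1 < xs.length := by simp at hj; omega
        refine ⟨xs.getD (j - 1) 0, ?_, ?_⟩
        · rw [List.getD_eq_getElem _ _ hj']
          exact List.getElem_mem hj'
        rw [show j = (j - 1) + 1 from by omega, List.getD_cons_succ] at hgj
        simpa using hgj
    · rw [show ndIds (x :: xs) = ndIds xs from by simp [ndIds, hx]]
      rw [ih]
      constructor
      · rintro ⟨i, hi, j, hj, hij, hgi, hgj⟩
        exact ⟨i + 1, by simp; omega, j + 1, by simp; omega, by omega,
          by simpa [List.getD_cons_succ] using hgi, by simpa [List.getD_cons_succ] using hgj⟩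
      · rintro ⟨i, hi, j, hj, hij, hgi, hgj⟩
        match i, hij with
        | 0, _ =>
          rw [List.getD_cons_zero] at hgi
          exact absurd hgi hx
        | (i' + 1), _ =>
          have hj' : j - 1 < xs.length := by simp at hj; omega
          refine ⟨i', by simp at hi; omega, j - 1, hj', by omega, ?_, ?_⟩
          · simpa [List.getD_cons_succ] using hgi
          · rw [show j = (j - 1) + 1 from by omega, List.getD_cons_succ] at hgj
            exact hgj

theorem D_iff_ndIds (move : List (List Int)) :
    D_get_homogenity_in_each_group move ↔ ndIds (move.map (fun r => r.getD 0 0)) = false := by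
  rw [ndIds_false_iff]
  unfold D_get_homogenity_in_each_group
  have hget : ∀ k, k < move.length →
      (move.map (fun r => r.getD 0 0)).getD k 0 = (move.getD k []).getD 0 0 := by
    intro k hk
    rw [List.getD_eq_getElem _ _ (by simpa using hk), List.getD_eq_getElem _ _ hk]
    simp
  constructor
  · rintro ⟨i, hi, j, hj, hij, hgi, hgj⟩
    exact ⟨i, by simpa using hi, j, by simpa using hj, hij,
      by rw [hget i hi]; exact hgi, by rw [hget j hj]; exact hgj⟩
  · rintro ⟨i, hi, j, hj, hij, hgi, hgj⟩
    simp only [List.length_map] at hi hj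
    exact ⟨i, hi, j, hj, hij, by rw [← hget i hi]; exact hgi, by rw [← hget j hj]; exact hgj⟩

-- proof-only helper: the runs of A's result — a -1-id run that is not last is dropped
def prune : List (List (List Int)) → List (List (List Int))
  | [] => []
  | [r] => [r]
  | r :: rs :: t =>
    if (r.headD []).getD 0 0 = -1 then prune (rs :: t) else r :: prune (rs :: t)

theorem prune_le (l : List (List (List Int))) : (prune l).length ≤ l.length := by
  induction l using prune.induct <;> simp_all [prune] <;> omega

theorem runsB_cons (row : List Int) (rest : List (List Int)) :
    runsB (row :: rest)
      = (row :: rest.takeWhile (fun r => r.getD 0 0 == row.getD 0 0))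
        :: runsB (rest.dropWhile (fun r => r.getD 0 0 == row.getD 0 0)) := by
  rw [runsB]

theorem alt_eq (row : List Int) (rest : List (List Int)) :
    get_homogenity_in_each_group_alt (row :: rest)
      = (runsB (row :: rest)).map homogRun := by
  unfold get_homogenity_in_each_group_alt
  rw [runsB_cons]
  simp

theorem dropWhile_head_not {α : Type} (p : α → Bool) (l : List α) (x : α) (xs : List α)
    (h : l.dropWhile p = x :: xs) : p x = false := by
  induction l with
  | nil => simp at h
  | cons a l ih =>
    rw [List.dropWhile_cons] at h
    by_cases hp : p a
    · simp [hp] at h; exact ih h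
    · simp [hp] at h
      obtain ⟨rfl, -⟩ := h
      simpa using hp

-- consuming a uniform run with matching current group id just accumulates the counts
theorem loopA_uniform (run : List (List Int)) (g b s : Int) (res : List Int)
    (rest : List (List Int)) (h : ∀ r ∈ run, r.getD 0 0 = g) :
    loopA g b s res (run ++ rest) =
      loopA g (b + (run.countP (fun r => r.getD 1 0 == 1) : Int))
              (s + (run.countP (fun r => r.getD 1 0 == 0) : Int)) res rest := by
  induction run generalizing b s with
  | nil => simp
  | cons r run ih =>
    have hid : r.getD 0 0 = g := h r (List.mem_cons_self)
    have hrun : ∀ x ∈ run, x.getD 0 0 = g := fun x hx => h x (List.mem_cons_of_mem _ hx)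
    rw [List.cons_append]
    show loopA g b s res (r :: (run ++ rest)) = _
    simp only [loopA]
    rw [if_neg (by simp only [ne_eq, not_not]; exact hid : ¬(r.getD 0 0 ≠ g))]
    rw [ih _ _ hrun]
    have h1 : (if r.getD 1 0 = 1 then b + 1 else b) + (run.countP (fun x => x.getD 1 0 == 1) : Int)
        = b + ((r :: run).countP (fun x => x.getD 1 0 == 1) : Int) := by
      by_cases hc : r.getD 1 0 = 1 <;> simp [List.countP_cons, hc] <;> push_cast <;> omega
    have h2 : (if r.getD 1 0 = 0 then s + 1 else s) + (run.countP (fun x => x.getD 1 0 == 0) : Int)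
        = s + ((r :: run).countP (fun x => x.getD 1 0 == 0) : Int) := by
      by_cases hc : r.getD 1 0 = 0 <;> simp [List.countP_cons, hc] <;> push_cast <;> omega
    rw [h1, h2]

-- full characterisation of A's loop from a fresh run boundary
theorem loopA_runs (move : List (List Int)) :
    ∀ (gid b s : Int) (res : List Int), move ≠ [] → (move.headD []).getD 0 0 ≠ gid →
    loopA gid b s res move =
      (res ++ (if gid = -1 then [] else [|b - s|])) ++ (prune (runsB move)).map homogRun := by
  induction move using runsB.induct with
  | case1 => intro _ _ _ _ hne _; exact absurd rfl hne
  | case2 row rest ih =>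
    intro gid b s res _ hg
    simp only [List.headD_cons] at hg
    have hmem : ∀ x ∈ rest.takeWhile (fun r => r.getD 0 0 == row.getD 0 0),
        x.getD 0 0 = row.getD 0 0 := by
      intro x hx
      simpa using List.mem_takeWhile_imp hx
    have hres1 : (if gid ≠ -1 then res ++ [|b - s|] else res)
        = res ++ (if gid = -1 then [] else [|b - s|]) := by
      by_cases hgid : gid = -1 <;> simp [hgid]
    show loopA gid b s res (row :: rest) = _
    simp only [loopA]
    rw [if_pos hg]
    conv_lhs => rw [← List.takeWhile_append_dropWhile
      (p := fun r => r.getD 0 0 == row.getD 0 0) (l := rest)]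
    rw [loopA_uniform _ _ _ _ _ _ hmem]
    have hB : (if row.getD 1 0 = 1 then (0:Int) + 1 else 0)
          + ((rest.takeWhile (fun r => r.getD 0 0 == row.getD 0 0)).countP (fun r => r.getD 1 0 == 1) : Int)
        = (((row :: rest.takeWhile (fun r => r.getD 0 0 == row.getD 0 0)).countP (fun r => r.getD 1 0 == 1) : Nat) : Int) := by
      by_cases hc : row.getD 1 0 = 1 <;> simp [List.countP_cons, hc] <;> ring
    have hS : (if row.getD 1 0 = 0 then (0:Int) + 1 else 0)
          + ((rest.takeWhile (fun r => r.getD 0 0 == row.getD 0 0)).countP (fun r => r.getD 1 0 == 0) : Int)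
        = (((row :: rest.takeWhile (fun r => r.getD 0 0 == row.getD 0 0)).countP (fun r => r.getD 1 0 == 0) : Nat) : Int) := by
      by_cases hc : row.getD 1 0 = 0 <;> simp [List.countP_cons, hc] <;> ring
    rw [hB, hS, hres1]
    rcases hdw : rest.dropWhile (fun r => r.getD 0 0 == row.getD 0 0) with _ | ⟨r0, t⟩
    · rw [hdw]
      simp only [loopA]
      simp only [runsB, hdw, prune, List.map_cons, List.map_nil, homogRun]
    · have hr0 : r0.getD 0 0 ≠ row.getD 0 0 := by
        simpa using dropWhile_head_not _ _ _ _ hdw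
      rw [hdw] at ih
      rw [hdw]
      rw [ih _ _ _ _ (List.cons_ne_nil _ _) (by simpa using hr0)]
      simp only [runsB, hdw]
      by_cases hgm1 : row.getD 0 0 = -1
      · have hgid : ¬ gid = -1 := fun hh => hg (by rw [hgm1, hh])
        have hgm1' : row[0]?.getD 0 = -1 := by simpa using hgm1
        simp [prune, hgm1', hgid, List.append_assoc]
      · have hgm1' : ¬ row[0]?.getD 0 = -1 := by simpa using hgm1
        simp [prune, hgm1', List.append_assoc, homogRun]

theorem ndIds_peel (l1 : List Int) (l2 : List Int) (g : Int)
    (h : ∀ x ∈ l1, x = g) (hg : g ≠ -1) : ndIds (l1 ++ l2) = ndIds l2 := by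
  induction l1 with
  | nil => simp
  | cons a l ih =>
    have ha : a = g := h a (List.mem_cons_self)
    rw [List.cons_append]
    show ndIds (a :: (l ++ l2)) = _
    simp only [ndIds, ha, if_neg hg]
    exact ih (fun x hx => h x (List.mem_cons_of_mem _ hx))

theorem ndIds_all_neg (l : List Int) (h : ∀ x ∈ l, x = -1) : ndIds l = true := by
  cases l with
  | nil => rfl
  | cons a t =>
    have ha : a = -1 := h a (List.mem_cons_self)
    show ndIds (a :: t) = true
    simp only [ndIds, ha, if_pos]
    simp only [List.all_eq_true]
    intro x hx
    simp [h x (List.mem_cons_of_mem _ hx)]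

-- under ¬D_, the ids after the head run of `row :: rest` still satisfy ndIds
-- under a head run whose id is not -1, ndIds of the whole equals ndIds after the run
theorem ndIds_tail (row : List Int) (rest : List (List Int))
    (hgm1 : row.getD 0 0 ≠ -1) :
    ndIds ((row :: rest).map (fun r => r.getD 0 0))
      = ndIds ((rest.dropWhile (fun r => r.getD 0 0 == row.getD 0 0)).map (fun r => r.getD 0 0)) := by
  simp only [List.map_cons]
  rw [show ndIds (row.getD 0 0 :: rest.map (fun r => r.getD 0 0))
      = ndIds (rest.map (fun r => r.getD 0 0)) from by simp only [ndIds, if_neg hgm1]]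
  conv_lhs => rw [← List.takeWhile_append_dropWhile
    (p := fun r => r.getD 0 0 == row.getD 0 0) (l := rest)]
  rw [List.map_append, ndIds_peel _ _ (row.getD 0 0) ?_ hgm1]
  intro x hx
  simp only [List.mem_map] at hx
  obtain ⟨r, hr, rfl⟩ := hx
  simpa using List.mem_takeWhile_imp hr

theorem prune_id (move : List (List Int))
    (h : ndIds (move.map (fun r => r.getD 0 0)) = true) :
    prune (runsB move) = runsB move := by
  induction move using runsB.induct with
  | case1 => simp [runsB, prune]
  | case2 row rest ih =>
    simp only [runsB]
    rcases hdw : rest.dropWhile (fun r => r.getD 0 0 == row.getD 0 0) with _ | ⟨r0, t⟩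
    · rw [hdw]
      simp [runsB, prune]
    · have hr0 : r0.getD 0 0 ≠ row.getD 0 0 := by
        simpa using dropWhile_head_not _ _ _ _ hdw
      have hr0mem : r0 ∈ rest :=
        (List.dropWhile_sublist _).subset (by rw [hdw]; exact List.mem_cons_self)
      by_cases hgm1 : row.getD 0 0 = -1
      · exfalso
        simp only [List.map_cons, hgm1] at h
        rw [show ndIds (-1 :: rest.map (fun r => r.getD 0 0))
            = (rest.map (fun r => r.getD 0 0)).all (fun y => y == -1) from by
          simp [ndIds]] at h
        simp only [List.all_eq_true] at h
        have := h (r0.getD 0 0) (List.mem_map_of_mem hr0mem)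
        rw [hgm1] at hr0
        simp_all
      · have h' : ndIds ((r0 :: t).map (fun r => r.getD 0 0)) = true := by
          rw [← hdw, ← ndIds_tail row rest hgm1]
          exact h
        rw [hdw] at ih
        rw [hdw]
        have hrec := ih h'
        simp only [runsB] at hrec ⊢
        simp only [prune, List.headD_cons]
        rw [if_neg hgm1, hrec]

theorem prune_lt (move : List (List Int))
    (h : ndIds (move.map (fun r => r.getD 0 0)) = false) :
    (prune (runsB move)).length < (runsB move).length := by
  induction move using runsB.induct with
  | case1 => simp [ndIds] at h
  | case2 row rest ih =>
    simp only [runsB]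
    rcases hdw : rest.dropWhile (fun r => r.getD 0 0 == row.getD 0 0) with _ | ⟨r0, t⟩
    · exfalso
      have hrest : rest.takeWhile (fun r => r.getD 0 0 == row.getD 0 0) = rest := by
        have := List.takeWhile_append_dropWhile
          (p := fun r => r.getD 0 0 == row.getD 0 0) (l := rest)
        rw [hdw] at this
        simpa using this
      have hall : ∀ x ∈ rest, x.getD 0 0 = row.getD 0 0 := by
        intro x hx
        rw [← hrest] at hx
        simpa using List.mem_takeWhile_imp hx
      by_cases hgm1 : row.getD 0 0 = -1
      · rw [show (row :: rest).map (fun r => r.getD 0 0)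
            = row.getD 0 0 :: rest.map (fun r => r.getD 0 0) from by simp] at h
        rw [ndIds_all_neg _ ?_] at h
        · exact absurd h (by simp)
        · intro x hx
          rcases List.mem_cons.mp hx with rfl | hx'
          · exact hgm1
          · simp only [List.mem_map] at hx'
            obtain ⟨r, hr, rfl⟩ := hx'
            rw [hall r hr]; exact hgm1
      · rw [ndIds_tail row rest hgm1, hdw] at h
        simp [ndIds] at h
    · by_cases hgm1 : row.getD 0 0 = -1
      · rw [hdw]
        simp only [runsB]
        simp only [prune, List.headD_cons]
        rw [if_pos hgm1]
        refine lt_of_le_of_lt (prune_le _) ?_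
        simp
      · have h' : ndIds ((r0 :: t).map (fun r => r.getD 0 0)) = false := by
          rw [← hdw, ← ndIds_tail row rest hgm1]
          exact h
        rw [hdw] at ih
        rw [hdw]
        have hrec := ih h'
        simp only [runsB] at hrec ⊢
        simp only [prune, List.headD_cons]
        rw [if_neg hgm1]
        simp only [List.length_cons] at hrec ⊢
        omega

-- ===== VERDICT (by name: the statement is the Claim_ definition above) =====
theorem get_homogenity_in_each_group_spec : Claim_unchanged_get_homogenity_in_each_group := by
  intro move _ _ hnd
  have hnd' : ndIds (move.map (fun r => r.getD 0 0)) = true := by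
    rw [← Bool.not_eq_false, ← D_iff_ndIds]
    exact hnd
  show get_homogenity_in_each_group move = get_homogenity_in_each_group_alt move
  cases move with
  | nil => simp [get_homogenity_in_each_group, get_homogenity_in_each_group_alt, loopA, runsB]
  | cons row rest =>
    by_cases hgm1 : row.getD 0 0 = -1
    · have hall : ∀ x ∈ rest, x.getD 0 0 = -1 := by
        simp only [List.map_cons, hgm1] at hnd'
        rw [show ndIds (-1 :: rest.map (fun r => r.getD 0 0))
            = (rest.map (fun r => r.getD 0 0)).all (fun y => y == -1) from by
          simp [ndIds]] at hnd'
        simp only [List.all_eq_true] at hnd'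
        intro x hx
        simpa using hnd' _ (List.mem_map_of_mem hx)
      have hallc : ∀ x ∈ (row :: rest), x.getD 0 0 = -1 := by
        intro x hx
        rcases List.mem_cons.mp hx with rfl | hx'
        · exact hgm1
        · exact hall _ hx'
      have hdrop : rest.dropWhile (fun r => r.getD 0 0 == row.getD 0 0) = [] := by
        rw [List.dropWhile_eq_nil_iff]
        intro x hx
        simp only [beq_iff_eq]
        rw [hall x hx, hgm1]
      have htw : rest.takeWhile (fun r => r.getD 0 0 == row.getD 0 0) = rest := by
        have := List.takeWhile_append_dropWhile
          (p := fun r => r.getD 0 0 == row.getD 0 0) (l := rest)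
        rw [hdrop] at this
        simpa using this
      have hA := loopA_uniform (row :: rest) (-1) 0 0 [] [] hallc
      rw [List.append_nil] at hA
      unfold get_homogenity_in_each_group
      rw [hA]
      unfold get_homogenity_in_each_group_alt
      simp only [runsB, hdrop, htw, loopA]
      simp [homogRun]
    · have hA := loopA_runs (row :: rest) (-1) 0 0 [] (by simp) (by simpa using hgm1)
      rw [prune_id _ hnd'] at hA
      unfold get_homogenity_in_each_group
      rw [hA]
      unfold get_homogenity_in_each_group_alt
      simp only [runsB]
      simp

theorem get_homogenity_in_each_group_changed : Claim_changed_get_homogenity_in_each_group := by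
  unfold Claim_changed_get_homogenity_in_each_group
  refine ⟨by decide, by decide, by decide, by decide, ?_, by decide⟩
  simp [get_homogenity_in_each_group_alt, pvDiffWitness_get_homogenity_in_each_group,
    pvDiffWitnessOut_get_homogenity_in_each_group, runsB, homogRun]

theorem get_homogenity_in_each_group_tight : Claim_exact_get_homogenity_in_each_group := by
  intro move _ _ hD
  rw [D_iff_ndIds] at hD
  cases move with
  | nil => simp [ndIds] at hD
  | cons row rest =>
    by_cases hgm1 : row.getD 0 0 = -1
    · -- the head run has the sentinel id: A drops it unless it is the whole input
      rcases hdw : rest.dropWhile (fun r => r.getD 0 0 == row.getD 0 0) with _ | ⟨r0, t⟩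
      · exfalso
        have htw : rest.takeWhile (fun r => r.getD 0 0 == row.getD 0 0) = rest := by
          have := List.takeWhile_append_dropWhile
            (p := fun r => r.getD 0 0 == row.getD 0 0) (l := rest)
          rw [hdw] at this
          simpa using this
        have hall : ∀ x ∈ rest, x.getD 0 0 = -1 := by
          intro x hx
          rw [← htw] at hx
          have := List.mem_takeWhile_imp hx
          simp only [beq_iff_eq] at this
          rw [this, hgm1]
        rw [show (row :: rest).map (fun r => r.getD 0 0)
            = row.getD 0 0 :: rest.map (fun r => r.getD 0 0) from by simp] at hD
        rw [ndIds_all_neg _ ?_] at hD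
        · exact absurd hD (by simp)
        · intro x hx
          rcases List.mem_cons.mp hx with rfl | hx'
          · exact hgm1
          · simp only [List.mem_map] at hx'
            obtain ⟨r, hr, rfl⟩ := hx'
            exact hall r hr
      · have hr0 : r0.getD 0 0 ≠ row.getD 0 0 := by
          simpa using dropWhile_head_not _ _ _ _ hdw
        have hmemtw : ∀ x ∈ row :: rest.takeWhile (fun r => r.getD 0 0 == row.getD 0 0),
            x.getD 0 0 = row.getD 0 0 := by
          intro x hx
          rcases List.mem_cons.mp hx with rfl | hx'
          · rfl
          · simpa using List.mem_takeWhile_imp hx'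
        have hA : get_homogenity_in_each_group (row :: rest)
            = (prune (runsB (r0 :: t))).map homogRun := by
          unfold get_homogenity_in_each_group
          conv_lhs => rw [show row :: rest
            = (row :: rest.takeWhile (fun r => r.getD 0 0 == row.getD 0 0))
              ++ (r0 :: t) from by
            rw [← hdw, List.cons_append, List.takeWhile_append_dropWhile]]
          rw [loopA_uniform _ _ _ _ _ _ (fun x hx => (hmemtw x hx).trans hgm1)]
          rw [loopA_runs _ _ _ _ _ (by simp) (by
            simp only [List.headD_cons]
            intro hh
            exact hr0 (by rw [hh, hgm1]))]
          simp
        intro heq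
        have hlen := congrArg List.length heq
        rw [hA, alt_eq, runsB_cons row rest, hdw] at hlen
        simp only [List.length_map, List.length_cons] at hlen
        have hle := prune_le (runsB (r0 :: t))
        omega
    · have hnd : ndIds ((row :: rest).map (fun r => r.getD 0 0)) = false := hD
      have hA := loopA_runs (row :: rest) (-1) 0 0 [] (by simp) (by simpa using hgm1)
      intro heq
      unfold get_homogenity_in_each_group at heq
      rw [hA, alt_eq] at heq
      have hlt := prune_lt _ hnd
      have hlen := congrArg List.length heq
      simp at hlen
      omega
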